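-- pv_equiv track=rewrite | github.com/acmeism/RosettaCodeData | Task/Square-but-not-cube/Python/square-but-not-cube.py | nonCubeSquares
-- ===== SOURCE A (Python) =====
-- def nonCubeSquares(n):
--     upto = enumFromTo(1)
--     ns = upto(n)
--     setCubes = set(x ** 3 for x in ns)
--     ms = upto(n + len(set(x * x for x in ns).intersection(
--         setCubes
--     )))
--     return list(tuple([x * x, x in setCubes]) for x in ms)
--
-- def enumFromTo(m):
--     return lambda n: list(range(m, 1 + n))
-- ===== SOURCE B (Python) =====
-- def nonCubeSquares(n):
--     # count k = number of p >= 1 with p**3 <= n (the square/cube overlap count)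
--     k = 0
--     while (k + 1) ** 3 <= n:
--         k += 1
--     out = []
--     c = 1  # rising cube-root walker: smallest c with c**3 >= current x
--     for x in range(1, n + k + 1):
--         while c * c * c < x:
--             c += 1
--         out.append((x * x, c * c * c == x))
--     return out
-- ===== Notes on version B (the rewrite author's own statement) =====
-- stated objective: faster
-- what changed: B drops A's two set comprehensions and set intersection entirely: it counts the square/cube overlaps with an integer loop on p (p**3 <= n) and flags cubes with a rising integer cube-root walker carried across the single output loop, so no hash sets or cube/square tables are ever built.
import Mathlib
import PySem

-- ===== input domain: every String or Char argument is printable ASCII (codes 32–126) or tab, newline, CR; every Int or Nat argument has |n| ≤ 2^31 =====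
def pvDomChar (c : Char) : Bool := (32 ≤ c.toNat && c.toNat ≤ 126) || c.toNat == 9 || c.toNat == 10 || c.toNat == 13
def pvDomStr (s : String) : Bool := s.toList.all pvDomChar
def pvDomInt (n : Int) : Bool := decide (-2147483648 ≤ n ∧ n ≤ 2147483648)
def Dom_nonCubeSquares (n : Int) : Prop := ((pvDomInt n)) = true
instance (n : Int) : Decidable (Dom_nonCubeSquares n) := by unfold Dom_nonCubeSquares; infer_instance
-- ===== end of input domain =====

-- B replaces A's set-comprehension/intersection strategy by an integer cube-root
-- counter and a rising cube-root walker: no sets are built (objective: faster by a constant factor, measured).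

-- ===== PORT A =====
def enumFromTo (m : Int) : Int → List Int := fun n => PySem.List.pyRange m (1 + n) 1

def nonCubeSquares (n : Int) : List (Int × Bool) :=
  let upto := enumFromTo 1
  let ns := upto n
  let setCubes : PySem.Set Int := PySem.Set.ofList (ns.map (fun x => x ^ 3))
  let ms := upto (n + PySem.Set.len (PySem.Set.inter (PySem.Set.ofList (ns.map (fun x => x * x))) setCubes))
  ms.map (fun x => (x * x, PySem.Set.contains setCubes x))

-- ===== PORT B =====
-- termination helper for the two while-loops (cited by decreasing_by)
theorem le_cube_nat (c : Nat) : c ≤ c * c * c := by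
  rcases Nat.eq_zero_or_pos c with h | h
  · simp [h]
  · calc c = c * 1 * 1 := by ring
      _ ≤ c * c * c := Nat.mul_le_mul (Nat.mul_le_mul_left c h) h

-- `while (k+1)**3 <= n: k += 1`
def altCount (n : Int) (k : Nat) : Nat :=
  if ((k : Int) + 1) ^ 3 ≤ n then altCount n (k + 1) else k
termination_by (n + 1 - k).toNat
decreasing_by
  have h1 : ((k : Int) + 1) ≤ ((k : Int) + 1) ^ 3 := by
    have := le_cube_nat (k + 1)
    push_cast at this
    calc ((k : Int) + 1) ≤ ((k:Int)+1) * ((k:Int)+1) * ((k:Int)+1) := by exact_mod_cast this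
      _ = ((k:Int)+1) ^ 3 := by ring
  omega

-- `while c*c*c < x: c += 1`
def altStep (c : Nat) (x : Int) : Nat :=
  if ((c : Int)) * c * c < x then altStep (c + 1) x else c
termination_by (x - c).toNat
decreasing_by
  have h1 : (c : Int) ≤ (c : Int) * c * c := by exact_mod_cast le_cube_nat c
  omega

-- `for x in range(1, n+k+1): … out.append((x*x, c*c*c == x))`
def altGo (c : Nat) (xs : List Int) : List (Int × Bool) :=
  match xs with
  | [] => []
  | x :: rest =>
    let c' := altStep c x
    (x * x, decide (((c' : Int)) * c' * c' = x)) :: altGo c' rest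

def nonCubeSquares_alt (n : Int) : List (Int × Bool) :=
  let k := altCount n 0
  altGo 1 (PySem.List.pyRange 1 (n + (k : Int) + 1) 1)

-- ===== PRECONDITION & SPEC =====
def Spec_nonCubeSquares (n : Int) (out : List (Int × Bool)) : Prop := out = nonCubeSquares_alt n
instance (n : Int) (out : List (Int × Bool)) : Decidable (Spec_nonCubeSquares n out) := by unfold Spec_nonCubeSquares; infer_instance

-- ===== CLAIM (what is proved, stated in full; the proofs are below) =====
def Claim_equal_nonCubeSquares : Prop := ∀ (n : Int), Dom_nonCubeSquares n → Spec_nonCubeSquares n (nonCubeSquares n)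

-- ===== LEMMAS AND PROOFS =====

-- cube monotonicity over Int
theorem cube_lt_iff (a b : Int) : a ^ 3 < b ^ 3 ↔ a < b :=
  (Odd.strictMono_pow (by decide)).lt_iff_lt
theorem cube_le_iff (a b : Int) : a ^ 3 ≤ b ^ 3 ↔ a ≤ b :=
  (Odd.strictMono_pow (by decide)).le_iff_le

-- spec of altCount: the result K satisfies K^3 ≤ n < (K+1)^3 (given k^3 ≤ n), k ≤ K
theorem altCount_spec (n : Int) (k : Nat) (h : ((k : Int)) ^ 3 ≤ n) :
    ((altCount n k : Int)) ^ 3 ≤ n ∧ n < ((altCount n k : Int) + 1) ^ 3 ∧ k ≤ altCount n k := by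
  fun_induction altCount with
  | case1 k hif ih =>
    have := ih (by push_cast; exact hif)
    push_cast at this ⊢
    refine ⟨this.1, this.2.1, by omega⟩
  | case2 k hif => exact ⟨h, by omega, le_refl _⟩

-- spec of altStep: result s is the least s ≥ c with x ≤ s^3
theorem altStep_spec (c : Nat) (x : Int) :
    c ≤ altStep c x ∧ x ≤ ((altStep c x : Int)) ^ 3 ∧
      (∀ d : Nat, c ≤ d → d < altStep c x → ((d : Int)) ^ 3 < x) := by
  fun_induction altStep with
  | case1 c hif ih =>
    refine ⟨by omega, ih.2.1, ?_⟩
    intro d hcd hds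
    rcases Nat.eq_or_lt_of_le hcd with heq | hlt
    · have hd : ((d : Int)) * d * d < x := by rw [← heq]; exact hif
      calc ((d : Int)) ^ 3 = (d : Int) * d * d := by ring
        _ < x := hd
    · exact ih.2.2 d hlt hds
  | case2 c hif =>
    refine ⟨le_refl _, ?_, fun d h1 h2 => absurd h1 (by omega)⟩
    have h2 : ¬ ((c : Int)) * c * c < x := hif
    calc x ≤ (c : Int) * c * c := by omega
      _ = ((c : Int)) ^ 3 := by ring

-- membership in A's cube set
theorem mem_cubeList (n z : Int) :
    (z ∈ (PySem.List.pyRange 1 (1 + n) 1).map (fun x => x ^ 3)) ↔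
      ∃ y : Int, 1 ≤ y ∧ y ≤ n ∧ y ^ 3 = z := by
  simp only [List.mem_map, PySem.List.mem_pyRange_one]
  constructor
  · rintro ⟨y, ⟨h1, h2⟩, rfl⟩; exact ⟨y, h1, by omega, rfl⟩
  · rintro ⟨y, h1, h2, rfl⟩; exact ⟨y, ⟨h1, by omega⟩, rfl⟩

-- the flag equivalence: under the walker invariant, B's cube test agrees with A's set membership
theorem flag_eq (n : Int) (hn : 1 ≤ n) (K : Nat) (hK3 : ((K : Int)) ^ 3 ≤ n)
    (x : Int) (_hx1 : 1 ≤ x) (hxu : x ≤ n + K)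
    (c : Nat) (hc : 1 ≤ c) (hinv : ((c : Int) - 1) ^ 3 < x) :
    (decide (((altStep c x : Int)) * (altStep c x) * (altStep c x) = x)) =
      PySem.Set.contains (PySem.Set.ofList ((PySem.List.pyRange 1 (1 + n) 1).map (fun x => x ^ 3))) x := by
  obtain ⟨hs1, hs2, hs3⟩ := altStep_spec c x
  set s := altStep c x with hsdef
  have hKn : (K : Int) ≤ n := by
    have h1 := le_cube_nat K
    have h2 : (K : Int) ≤ (K : Int) ^ 3 := by
      have h3 : ((K : Int)) * K * K = ((K : Int)) ^ 3 := by ring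
      rw [← h3]; exact_mod_cast h1
    omega
  rw [Bool.eq_iff_iff]
  simp only [decide_eq_true_eq, PySem.Set.contains_iff, PySem.Set.mem_ofList, mem_cubeList]
  constructor
  · intro hcube
    have hx3 : ((s : Int)) ^ 3 = x := by rw [← hcube]; ring
    refine ⟨(s : Int), by exact_mod_cast hc.trans hs1, ?_, hx3⟩
    by_contra hgt
    push_neg at hgt
    have h1 : n + 1 ≤ (s : Int) := by omega
    have h2 : (n + 1) ^ 3 ≤ ((s : Int)) ^ 3 := (cube_le_iff _ _).mpr h1
    nlinarith
  · rintro ⟨y, hy1, hy2, hy3⟩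
    have hcy : (c : Int) ≤ y := by
      by_contra hlt
      push_neg at hlt
      have h4 : y ^ 3 ≤ ((c : Int) - 1) ^ 3 := (cube_le_iff _ _).mpr (by omega)
      omega
    have hylt : ¬ (y < (s : Int)) := by
      intro hlt
      have hyn : y.toNat < s := by omega
      have h4 := hs3 y.toNat (by omega) hyn
      rw [Int.toNat_of_nonneg (by omega)] at h4
      omega
    have hle : y ≤ (s : Int) := by
      by_contra hlt
      push_neg at hlt
      have h4 : ((s : Int)) ^ 3 < y ^ 3 := (cube_lt_iff _ _).mpr hlt
      omega
    have heq : (s : Int) = y := le_antisymm (by omega) hle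
    rw [heq]
    calc y * y * y = y ^ 3 := by ring
      _ = x := hy3

-- the walker loop produces A's per-element pairs
theorem altGo_eq (n : Int) (hn : 1 ≤ n) (K : Nat) (hK3 : ((K : Int)) ^ 3 ≤ n) :
    ∀ (m : Nat) (a : Int) (c : Nat), 1 ≤ a → a + m = n + K + 1 → 1 ≤ c →
      ((c : Int) - 1) ^ 3 < a →
      altGo c (PySem.List.pyRange a (n + K + 1) 1) =
        (PySem.List.pyRange a (n + K + 1) 1).map
          (fun x => (x * x, PySem.Set.contains (PySem.Set.ofList ((PySem.List.pyRange 1 (1 + n) 1).map (fun x => x ^ 3))) x)) := by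
  intro m
  induction m with
  | zero =>
    intro a c ha hm hc hinv
    rw [PySem.List.pyRange_one_eq_nil (by omega)]
    rfl
  | succ m ih =>
    intro a c ha hm hc hinv
    rw [PySem.List.pyRange_one_cons (by omega)]
    rw [List.map_cons]
    rw [altGo]
    have hflag := flag_eq n hn K hK3 a ha (by omega) c hc hinv
    obtain ⟨hs1, hs2, hs3⟩ := altStep_spec c a
    refine congrArg₂ _ (by rw [hflag]) ?_
    apply ih (a + 1) (altStep c a) (by omega) (by omega) (by omega)
    -- new invariant: (altStep c a - 1)^3 < a + 1
    rcases Nat.eq_or_lt_of_le hs1 with heq | hlt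
    · rw [← heq]; omega
    · have := hs3 (altStep c a - 1) (by omega) (by omega)
      have hcast : ((altStep c a - 1 : Nat) : Int) = (altStep c a : Int) - 1 := by omega
      rw [hcast] at this
      omega

-- A's squares list is duplicate-free, so set() leaves it unchanged
theorem squares_nodup (n : Int) :
    ((PySem.List.pyRange 1 (1 + n) 1).map (fun x => x * x)).Nodup := by
  refine List.Nodup.map_on ?_ (PySem.List.nodup_pyRange_one 1 (1 + n))
  intro x hx y hy hxy
  rw [PySem.List.mem_pyRange_one] at hx hy
  nlinarith

-- x^2 = y^3 with x, y ≥ 1 (over Int) yields a common sixth-power root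
theorem sq_eq_cube (x y : Int) (hx : 1 ≤ x) (hy : 1 ≤ y) (h : x * x = y ^ 3) :
    ∃ t : Nat, 1 ≤ t ∧ x = ((t : Int)) ^ 3 ∧ y = ((t : Int)) ^ 2 := by
  have hx' : x = (x.toNat : Int) := by omega
  have hy' : y = (y.toNat : Int) := by omega
  have hnat : x.toNat ^ 2 = y.toNat ^ 3 := by
    have : x ^ 2 = y ^ 3 := by nlinarith
    rw [hx', hy'] at this
    exact_mod_cast this
  obtain ⟨t, ht1, ht2⟩ := Nat.exists_eq_pow_of_exponent_coprime_of_pow_eq_pow (by decide) hnat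
  refine ⟨t, ?_, ?_, ?_⟩
  · rcases Nat.eq_zero_or_pos t with rfl | h1
    · simp at ht1; omega
    · exact h1
  · rw [hx', ht1]; push_cast; ring
  · rw [hy', ht2]; push_cast; ring

-- the intersection of A's two sets has exactly K elements, K = altCount n 0
theorem inter_len (n : Int) (hn : 1 ≤ n) :
    PySem.Set.len (PySem.Set.inter
        (PySem.Set.ofList ((PySem.List.pyRange 1 (1 + n) 1).map (fun x => x * x)))
        (PySem.Set.ofList ((PySem.List.pyRange 1 (1 + n) 1).map (fun x => x ^ 3))))
      = (altCount n 0 : Int) := by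
  obtain ⟨hK3, hK4, -⟩ := altCount_spec n 0 (by push_cast; omega)
  set K := altCount n 0 with hKdef
  rw [PySem.Set.ofList_eq_self_of_nodup _ (squares_nodup n)]
  simp only [PySem.Set.inter]
  have hperm : (((PySem.List.pyRange 1 (1 + n) 1).map (fun x => x * x)).filter
      (fun z => PySem.Set.contains (PySem.Set.ofList ((PySem.List.pyRange 1 (1 + n) 1).map (fun x => x ^ 3))) z)).Perm
      ((PySem.List.pyRange 1 ((K : Int) + 1) 1).map (fun t => t ^ 6)) := by
    rw [List.perm_ext_iff_of_nodup ((squares_nodup n).filter _)]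
    · intro z
      rw [List.mem_filter]
      simp only [List.mem_map, PySem.List.mem_pyRange_one, PySem.Set.contains_iff,
        PySem.Set.mem_ofList]
      constructor
      · rintro ⟨⟨x, ⟨hx1, hx2⟩, hxz⟩, y, ⟨hy1, hy2⟩, hyz⟩
        obtain ⟨t, ht1, ht2, ht3⟩ := sq_eq_cube x y hx1 hy1 (hxz.trans hyz.symm)
        have hxn : x ≤ n := by omega
        have htK : (t : Int) < (K : Int) + 1 := by
          by_contra hgt
          push_neg at hgt
          have h5 : ((K : Int) + 1) ^ 3 ≤ ((t : Int)) ^ 3 := (cube_le_iff _ _).mpr hgt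
          linarith [ht2 ▸ hxn]
        exact ⟨(t : Int), ⟨by exact_mod_cast ht1, htK⟩, by rw [← hxz, ht2]; ring⟩
      · rintro ⟨t, ⟨ht1, ht2⟩, rfl⟩
        have ht3 : t ^ 3 ≤ (K : Int) ^ 3 := (cube_le_iff _ _).mpr (by omega)
        have h2 : 1 ≤ t ^ 3 := one_le_pow₀ ht1
        have h23 : t ^ 2 ≤ t ^ 3 := pow_le_pow_right₀ ht1 (by norm_num)
        have h12 : 1 ≤ t ^ 2 := one_le_pow₀ ht1
        refine ⟨⟨t ^ 3, ⟨h2, by linarith⟩, by ring⟩, t ^ 2, ⟨h12, by linarith⟩, by ring⟩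
    · refine List.Nodup.map_on ?_ (PySem.List.nodup_pyRange_one _ _)
      intro a ha b hb hab
      rw [PySem.List.mem_pyRange_one] at ha hb
      by_contra hne
      rcases lt_or_gt_of_ne hne with h | h
      · have h6 := pow_lt_pow_left₀ h (by omega : (0:Int) ≤ a) (by norm_num : 6 ≠ 0)
        omega
      · have h6 := pow_lt_pow_left₀ h (by omega : (0:Int) ≤ b) (by norm_num : 6 ≠ 0)
        omega
  have hlen := hperm.length_eq
  simp only [PySem.Set.len]
  rw [hlen, List.length_map, PySem.List.length_pyRange_one]
  omega

-- the n ≤ 0 case: both sides are empty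
theorem both_nil (n : Int) (hn : n ≤ 0) : nonCubeSquares n = nonCubeSquares_alt n := by
  have h0 : altCount n 0 = 0 := by
    rw [altCount]
    rw [if_neg (by push_cast; omega)]
  simp only [nonCubeSquares, nonCubeSquares_alt, enumFromTo, h0]
  rw [PySem.List.pyRange_one_eq_nil (show 1 + n ≤ 1 by omega)]
  simp only [List.map_nil]
  rw [show (PySem.Set.ofList ([] : List Int)) = ([] : List Int) from rfl]
  rw [show PySem.Set.inter ([] : List Int) ([] : List Int) = ([] : List Int) from rfl]
  rw [show PySem.Set.len ([] : List Int) = 0 from rfl]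
  rw [PySem.List.pyRange_one_eq_nil (show 1 + (n + 0) ≤ 1 by omega)]
  rw [PySem.List.pyRange_one_eq_nil (show n + ((0:Nat) : Int) + 1 ≤ 1 by push_cast; omega)]
  rfl

-- ===== VERDICT (by name: the statement is the Claim_ definition above) =====
theorem nonCubeSquares_spec : Claim_equal_nonCubeSquares := by
  intro n _
  unfold Spec_nonCubeSquares
  rcases le_or_gt n 0 with hn | hn
  · exact both_nil n hn
  · have hn1 : 1 ≤ n := hn
    have hK3 := (altCount_spec n 0 (by push_cast; omega)).1
    have hKpos : (0 : Int) ≤ (altCount n 0 : Int) := by positivity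
    simp only [nonCubeSquares, nonCubeSquares_alt, enumFromTo]
    rw [inter_len n hn1]
    rw [show 1 + (n + (altCount n 0 : Int)) = n + (altCount n 0 : Int) + 1 from by ring]
    exact (altGo_eq n hn1 (altCount n 0) hK3 (n + (altCount n 0 : Int)).toNat 1 1 le_rfl
      (by omega) le_rfl (by norm_num)).symm
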